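-- pv_equiv track=rewrite | github.com/susobhan2403/ExpiryDayTrading | tools/dependency_graph_builder.py | _combine_graphs
-- ===== SOURCE A (Python) =====
-- from typing import Dict, List, Set, Tuple, Any, Optional
-- from collections import defaultdict
--
-- def _combine_graphs(static_graph, dynamic_graph, plugin_graph, runtime_graph) -> Dict[str, List[str]]:
--     """Combine all dependency graphs."""
--     combined = defaultdict(set)
--
--     # Add static dependencies
--     for module, deps in static_graph.items():
--         combined[module].update(deps)
--
--     # Add dynamic dependencies
--     for module, deps in dynamic_graph.items():
--         combined[module].update(deps)
--
--     # Add plugin dependencies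
--     for module, deps in plugin_graph.items():
--         combined[module].update(deps)
--
--     # Add runtime dependencies
--     for module, deps in runtime_graph.items():
--         combined[module].update(deps)
--
--     # Convert back to dict with lists
--     return {module: sorted(list(deps)) for module, deps in combined.items()}
-- ===== SOURCE B (Python) =====
-- def _combine_graphs(static_graph, dynamic_graph, plugin_graph, runtime_graph):
--     """Combine all dependency graphs (key-universe-first comprehension)."""
--     graphs = (static_graph, dynamic_graph, plugin_graph, runtime_graph)
--     modules = {m: None for g in graphs for m in g}
--     return {m: sorted({d for g in graphs for d in g.get(m, ())}) for m in modules}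
-- ===== Notes on version B (the rewrite author's own statement) =====
-- stated objective: simpler
-- what changed: Replaces the defaultdict accumulator updated by four sequential loops with two comprehensions: compute the ordered key universe once, then build each module's sorted union of the four per-graph lookups directly.
import Mathlib
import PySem

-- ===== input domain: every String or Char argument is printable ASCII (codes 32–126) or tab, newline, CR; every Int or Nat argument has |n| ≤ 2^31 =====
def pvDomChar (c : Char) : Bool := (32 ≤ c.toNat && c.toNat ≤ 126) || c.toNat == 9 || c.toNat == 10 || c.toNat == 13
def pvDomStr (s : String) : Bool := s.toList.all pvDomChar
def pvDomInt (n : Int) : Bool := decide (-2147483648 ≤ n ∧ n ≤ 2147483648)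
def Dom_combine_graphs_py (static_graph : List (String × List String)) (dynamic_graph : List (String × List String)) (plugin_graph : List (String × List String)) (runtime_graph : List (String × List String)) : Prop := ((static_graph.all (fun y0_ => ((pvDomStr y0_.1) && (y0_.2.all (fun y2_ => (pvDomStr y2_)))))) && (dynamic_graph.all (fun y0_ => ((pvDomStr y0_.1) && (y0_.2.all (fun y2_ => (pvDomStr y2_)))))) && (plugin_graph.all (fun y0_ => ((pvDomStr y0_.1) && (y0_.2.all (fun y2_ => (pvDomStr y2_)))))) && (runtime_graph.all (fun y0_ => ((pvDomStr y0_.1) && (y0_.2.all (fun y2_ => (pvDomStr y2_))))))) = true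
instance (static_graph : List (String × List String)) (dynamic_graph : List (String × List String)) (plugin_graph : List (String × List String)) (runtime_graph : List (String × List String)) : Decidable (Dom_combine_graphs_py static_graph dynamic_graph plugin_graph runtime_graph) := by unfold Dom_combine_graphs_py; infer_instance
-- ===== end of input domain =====

-- B replaces A's defaultdict accumulator and four update loops with a key-universe-first comprehension (same result; objective: simpler).


-- ===== PORT A =====
-- defaultdict(set) accumulator: combined[module].update(deps) = modify with default empty set
def pvStep (d : PySem.Dict String (PySem.Set String)) (p : String × List String) :
    PySem.Dict String (PySem.Set String) :=
  d.modify p.1 PySem.Set.empty (fun s => PySem.Set.update s p.2)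

def combine_graphs_py (static_graph : List (String × List String)) (dynamic_graph : List (String × List String)) (plugin_graph : List (String × List String)) (runtime_graph : List (String × List String)) : List (String × List String) :=
  let c1 := static_graph.foldl pvStep PySem.Dict.empty
  let c2 := dynamic_graph.foldl pvStep c1
  let c3 := plugin_graph.foldl pvStep c2
  let c4 := runtime_graph.foldl pvStep c3
  c4.items.map (fun p => (p.1, PySem.List.sorted p.2 (fun x => x) false))

-- ===== PORT B =====
-- key-universe-first: ordered dedup of all keys, then per-key union of the four lookups
def combine_graphs_py_alt (static_graph : List (String × List String)) (dynamic_graph : List (String × List String)) (plugin_graph : List (String × List String)) (runtime_graph : List (String × List String)) : List (String × List String) :=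
  let graphs := [static_graph, dynamic_graph, plugin_graph, runtime_graph]
  let modules := PySem.List.dedup (graphs.flatMap (fun g => g.map Prod.fst))
  modules.map (fun m =>
    (m, PySem.List.sorted
          (PySem.Set.ofList (graphs.flatMap (fun g => PySem.Dict.getD ⟨g⟩ m [])))
          (fun x => x) false))

-- ===== PRECONDITION & SPEC =====
-- Pre_ excludes association lists with duplicate keys: those never arise from Python dict
-- arguments, and on them A merges all duplicate entries while B's first-match get() sees only
-- the first — both behaviours are accidental readings of a non-dict input.
def Pre_combine_graphs_py (static_graph : List (String × List String)) (dynamic_graph : List (String × List String)) (plugin_graph : List (String × List String)) (runtime_graph : List (String × List String)) : Prop :=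
  (static_graph.map Prod.fst).Nodup ∧ (dynamic_graph.map Prod.fst).Nodup ∧
  (plugin_graph.map Prod.fst).Nodup ∧ (runtime_graph.map Prod.fst).Nodup
instance (static_graph : List (String × List String)) (dynamic_graph : List (String × List String)) (plugin_graph : List (String × List String)) (runtime_graph : List (String × List String)) : Decidable (Pre_combine_graphs_py static_graph dynamic_graph plugin_graph runtime_graph) := by unfold Pre_combine_graphs_py; infer_instance

def pvWitness_combine_graphs_py : (List (String × List String)) × (List (String × List String)) × (List (String × List String)) × (List (String × List String)) :=
  ([("a", ["b", "c"])], [("b", [])], [("a", ["d"])], [])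

def Spec_combine_graphs_py (static_graph : List (String × List String)) (dynamic_graph : List (String × List String)) (plugin_graph : List (String × List String)) (runtime_graph : List (String × List String)) (out : List (String × List String)) : Prop := out = combine_graphs_py_alt static_graph dynamic_graph plugin_graph runtime_graph
instance (static_graph : List (String × List String)) (dynamic_graph : List (String × List String)) (plugin_graph : List (String × List String)) (runtime_graph : List (String × List String)) (out : List (String × List String)) : Decidable (Spec_combine_graphs_py static_graph dynamic_graph plugin_graph runtime_graph out) := by unfold Spec_combine_graphs_py; infer_instance

-- ===== CLAIM (what is proved, stated in full; the proofs are below) =====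
def Claim_equal_combine_graphs_py : Prop := ∀ (static_graph : List (String × List String)) (dynamic_graph : List (String × List String)) (plugin_graph : List (String × List String)) (runtime_graph : List (String × List String)), Dom_combine_graphs_py static_graph dynamic_graph plugin_graph runtime_graph → Pre_combine_graphs_py static_graph dynamic_graph plugin_graph runtime_graph → Spec_combine_graphs_py static_graph dynamic_graph plugin_graph runtime_graph (combine_graphs_py static_graph dynamic_graph plugin_graph runtime_graph)

-- ===== LEMMAS AND PROOFS =====
lemma getD_foldl_pvStep (l : List (String × List String)) (d : PySem.Dict String (PySem.Set String)) (m : String) :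
    (l.foldl pvStep d).getD m PySem.Set.empty =
      PySem.Set.update (d.getD m PySem.Set.empty) ((l.filter (fun p => p.1 == m)).flatMap (fun p => p.2)) := by
  induction l generalizing d with
  | nil => simp [PySem.Set.update]
  | cons p t ih =>
    rw [List.foldl_cons, ih, List.filter_cons]
    by_cases h : p.1 = m
    · simp [h, pvStep, PySem.Set.update, List.foldl_append]
    · simp [h, pvStep, PySem.Dict.getD_modify, Ne.symm h]

lemma filter_flatMap_eq_getD (l : List (String × List String)) (m : String) (h : (l.map Prod.fst).Nodup) :
    (l.filter (fun p => p.1 == m)).flatMap (fun p => p.2) = PySem.Dict.getD ⟨l⟩ m [] := by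
  induction l with
  | nil => simp [PySem.Dict.getD, PySem.Dict.get?]
  | cons p t ih =>
    simp only [List.map_cons, List.nodup_cons] at h
    rw [List.filter_cons, PySem.Dict.getD_eq_get?_getD, PySem.Dict.get?_mk_cons]
    by_cases hm : p.1 = m
    · have hnil : t.filter (fun q => q.1 == m) = [] := by
        rw [List.filter_eq_nil_iff]
        intro q hq
        simp only [beq_iff_eq]
        intro hqm
        exact h.1 (hm ▸ hqm ▸ List.mem_map_of_mem hq)
      simp [hm, hnil]
    · simp only [beq_iff_eq, hm, if_false]
      simpa [← PySem.Dict.getD_eq_get?_getD] using ih h.2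

lemma keys_foldl_pvStep (l : List (String × List String)) (d : PySem.Dict String (PySem.Set String)) :
    (l.foldl pvStep d).keys = PySem.Set.update d.keys (l.map Prod.fst) :=
  PySem.Dict.keys_foldl_modify_key l Prod.fst PySem.Set.empty (fun _ x s => PySem.Set.update s x.2) d

lemma nodup_keys_foldl_pvStep (l : List (String × List String)) (d : PySem.Dict String (PySem.Set String)) (h : d.keys.Nodup) :
    (l.foldl pvStep d).keys.Nodup :=
  PySem.Dict.nodup_keys_foldl_modify_key l Prod.fst PySem.Set.empty (fun _ x s => PySem.Set.update s x.2) d h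

-- ===== VERDICT (by name: the statement is the Claim_ definition above) =====
theorem combine_graphs_py_spec : Claim_equal_combine_graphs_py := by
  intro s dy pl ru _ hpre
  obtain ⟨h1, h2, h3, h4⟩ := hpre
  unfold Spec_combine_graphs_py combine_graphs_py combine_graphs_py_alt
  simp only
  rw [← List.foldl_append, ← List.foldl_append, ← List.foldl_append]
  set L := s ++ (dy ++ (pl ++ ru)) with hL
  have hnd : (L.foldl pvStep PySem.Dict.empty).keys.Nodup :=
    nodup_keys_foldl_pvStep _ _ (by simp [PySem.Dict.keys_empty])
  rw [PySem.Dict.items_eq_map_keys _ hnd PySem.Set.empty, List.map_map]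
  have hkeys : (L.foldl pvStep PySem.Dict.empty).keys = PySem.Set.ofList (L.map Prod.fst) := by
    rw [keys_foldl_pvStep]
    simp [PySem.Dict.keys_empty, PySem.Set.update, PySem.Set.ofList_eq_foldl]
  have hmods : PySem.List.dedup ([s, dy, pl, ru].flatMap (fun g => g.map Prod.fst)) = PySem.Set.ofList (L.map Prod.fst) := by
    simp [hL, List.flatMap, List.map_append]
  rw [hkeys, hmods]
  apply List.map_congr_left
  intro m _
  simp only [Function.comp]
  congr 1
  rw [getD_foldl_pvStep]
  have hfil : L.filter (fun p => p.1 == m) =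
      s.filter (fun p => p.1 == m) ++ (dy.filter (fun p => p.1 == m) ++ (pl.filter (fun p => p.1 == m) ++ ru.filter (fun p => p.1 == m))) := by
    simp [hL, List.filter_append]
  rw [hfil]
  simp only [List.flatMap_append]
  rw [filter_flatMap_eq_getD s m h1, filter_flatMap_eq_getD dy m h2,
      filter_flatMap_eq_getD pl m h3, filter_flatMap_eq_getD ru m h4]
  simp [PySem.Dict.getD_empty, PySem.Set.update, PySem.Set.ofList_eq_foldl, List.flatMap]
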